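-- pv_equiv track=rewrite | github.com/comejv/tiny-jail | tools/merge_syscalls.py | resolve_abstract_to_concrete
-- ===== SOURCE A (Python) =====
-- from typing import Dict, List, Set, Optional
--
-- def resolve_abstract_to_concrete(
--     abstract_name: str, abstract_syscalls: Dict, visited: Set[str] = None
-- ) -> List[Dict]:
--     """
--     Recursively resolve an abstract syscall to concrete syscalls with their conditions.
--     Returns list of {base_name, condition, call} entries.
--     """
--     if visited is None:
--         visited = set()
--
--     # Avoid infinite recursion
--     if abstract_name in visited:
--         return []
--     visited.add(abstract_name)
--
--     concrete = []
--
--     if abstract_name not in abstract_syscalls: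
--         # It's already a concrete syscall
--         return [{"base_name": abstract_name, "condition": None}]
--
--     group = abstract_syscalls[abstract_name]
--     for impl in group.get("implementations", []):
--         base_name = impl.get("base_name")
--         if not base_name:
--             continue
--
--         # Check if base_name is another abstract syscall
--         if base_name in abstract_syscalls:
--             # Recursively resolve
--             resolved = resolve_abstract_to_concrete(
--                 base_name, abstract_syscalls, visited.copy()
--             )
--             concrete.extend(resolved)
--         else:
--             # It's a concrete syscall - preserve condition
--             concrete.append(
--                 {
--                     "base_name": base_name,
--                     "condition": impl.get("condition"),
--                     "call": impl.get("call"),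
--                 }
--             )
--
--     return concrete
-- ===== SOURCE B (Python) =====
-- def resolve_abstract_to_concrete(abstract_name, abstract_syscalls, visited=None):
--     """Iterative DFS with an explicit work stack instead of recursion.
--
--     Each work item is ('leaf', entry_dict) to emit or ('node', name, vis) to
--     expand with its path-local visited set; children are pushed in reverse so
--     LIFO popping reproduces the recursive left-to-right pre-order.
--     """
--     if visited is None:
--         visited = set()
--     if abstract_name in visited:
--         return []
--     if abstract_name not in abstract_syscalls:
--         return [{"base_name": abstract_name, "condition": None}]
--
--     result = []
--     stack = [("node", abstract_name, visited)]
--     while stack: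
--         item = stack.pop()
--         if item[0] == "leaf":
--             result.append(item[1])
--             continue
--         _, name, vis = item
--         if name in vis:
--             continue
--         new_vis = vis | {name}
--         group = abstract_syscalls[name]
--         for impl in reversed(group.get("implementations", [])):
--             base = impl.get("base_name")
--             if not base:
--                 continue
--             if base in abstract_syscalls:
--                 stack.append(("node", base, new_vis))
--             else:
--                 stack.append(
--                     ("leaf", {"base_name": base, "condition": impl.get("condition"), "call": impl.get("call")})
--                 )
--     return result
-- ===== Notes on version B (the rewrite author's own statement) =====
-- stated objective: alternative
-- what changed: Replaced A's recursion (recursive calls nested inside the implementations loop, with per-call copied visited sets) by an iterative depth-first traversal over an explicit work stack of leaf/node items, pushing a node's children in reverse so LIFO popping reproduces the same left-to-right pre-order output.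
import Mathlib
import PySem

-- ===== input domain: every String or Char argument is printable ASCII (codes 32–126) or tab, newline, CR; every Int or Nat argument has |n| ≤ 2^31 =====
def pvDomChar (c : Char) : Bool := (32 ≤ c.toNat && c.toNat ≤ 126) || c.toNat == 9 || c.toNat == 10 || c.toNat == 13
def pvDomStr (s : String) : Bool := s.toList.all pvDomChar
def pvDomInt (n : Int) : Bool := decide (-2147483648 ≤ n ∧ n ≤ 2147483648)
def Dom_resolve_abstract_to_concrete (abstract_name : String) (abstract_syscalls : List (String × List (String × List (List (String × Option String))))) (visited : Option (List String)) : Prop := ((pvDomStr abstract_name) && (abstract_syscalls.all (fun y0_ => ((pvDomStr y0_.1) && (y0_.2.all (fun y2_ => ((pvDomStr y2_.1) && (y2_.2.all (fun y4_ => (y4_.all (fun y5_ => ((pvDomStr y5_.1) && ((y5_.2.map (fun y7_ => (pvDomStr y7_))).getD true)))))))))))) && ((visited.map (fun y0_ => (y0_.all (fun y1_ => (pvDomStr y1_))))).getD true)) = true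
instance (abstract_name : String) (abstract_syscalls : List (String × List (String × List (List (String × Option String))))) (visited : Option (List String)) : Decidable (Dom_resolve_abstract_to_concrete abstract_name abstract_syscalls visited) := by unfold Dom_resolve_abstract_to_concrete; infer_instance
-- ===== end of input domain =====

-- B replaces A's recursion by an iterative DFS over an explicit work stack (same return value;
-- note A mutates the caller's `visited` set in place via visited.add(...) while B does not — the
-- equivalence proved here is about the RETURN value only).

-- ===== PORT A =====
-- A's recursion terminates because each recursive call's visited set contains one more key of
-- abstract_syscalls; the measure counts dict entries whose key is not yet visited.
def pvCnt (abstract_syscalls : List (String × List (String × List (List (String × Option String))))) (V : List String) : Nat :=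
  (abstract_syscalls.filter (fun p => !decide (p.1 ∈ V))).length

-- a strictly stronger filter that loses a witness has strictly smaller length (used by pvCnt_add_lt)
theorem pv_filter_lt {α : Type} (p q : α → Bool) (l : List α) (h : ∀ x, q x = true → p x = true)
    (x : α) (hx : x ∈ l) (hpx : p x = true) (hqx : q x = false) :
    (l.filter q).length < (l.filter p).length := by
  induction l with
  | nil => cases hx
  | cons a t ih =>
    rcases List.mem_cons.1 hx with rfl | hxt
    · rw [List.filter_cons, List.filter_cons, if_pos hpx, if_neg (by simp [hqx])]
      exact Nat.lt_succ_of_le (List.Sublist.length_le (List.monotone_filter_right t h))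
    · have hlt := ih hxt
      simp only [List.filter_cons]
      cases hqa : q a
      · cases hpa : p a <;> simp <;> omega
      · rw [h a hqa]; simp; omega

theorem pv_lookup_mem {α : Type} [BEq α] [LawfulBEq α] {β : Type} (k : α) (v : β) (l : List (α × β))
    (h : List.lookup k l = some v) : (k, v) ∈ l := by
  induction l with
  | nil => simp [List.lookup] at h
  | cons a t ih =>
    obtain ⟨ka, va⟩ := a
    by_cases hk : k = ka
    · subst hk
      have hbeq : (k == k) = true := by simp
      simp only [List.lookup, hbeq] at h
      cases h
      exact List.mem_cons_self
    · have hbeq : (k == ka) = false := by simp [hk]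
      simp only [List.lookup, hbeq] at h
      exact List.mem_cons_of_mem _ (ih h)

-- cited by the ports' decreasing_by: adding an unvisited key of the dict strictly shrinks the measure
theorem pvCnt_add_lt (sys : List (String × List (String × List (List (String × Option String))))) (V : List String) (name : String)
    (h1 : ¬ (PySem.Set.contains V name = true)) (h2 : (List.lookup name sys).isSome = true) :
    pvCnt sys (PySem.Set.add V name) < pvCnt sys V := by
  have hnm : name ∉ V := fun hm => h1 ((PySem.Set.contains_iff V name).2 hm)
  rw [PySem.Set.add_of_not_mem hnm]
  obtain ⟨g, hg⟩ := Option.isSome_iff_exists.1 h2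
  unfold pvCnt
  refine pv_filter_lt _ _ _ ?_ (name, g) (pv_lookup_mem _ _ _ hg) ?_ ?_
  · intro x hx
    simp only [Bool.not_eq_eq_eq_not, Bool.not_true, decide_eq_false_iff_not,
      List.mem_append] at hx ⊢
    exact fun hm => hx (Or.inl hm)
  · simpa using hnm
  · simp

mutual
-- body of A after the `visited is None` default is resolved
def resolve_abstract_to_concrete_core (sys : List (String × List (String × List (List (String × Option String))))) (abstract_name : String) (visited : List String) : List (List (String × Option String)) :=
  if h1 : PySem.Set.contains visited abstract_name then []     -- if abstract_name in visited: return []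
  else
    let visited' := PySem.Set.add visited abstract_name        -- visited.add(abstract_name)
    match h2 : List.lookup abstract_name sys with
    | none => [[("base_name", some abstract_name), ("condition", none)]]   -- already concrete
    | some group =>
        -- for impl in group.get("implementations", []): … (concrete starts as [])
        pvLoopA sys visited' ((List.lookup "implementations" group).getD []) []
  termination_by (pvCnt sys visited, 0, 0)
  decreasing_by
    exact Prod.Lex.left _ _ (pvCnt_add_lt sys visited abstract_name h1 (by simp [h2]))

-- A's for-loop over the implementations, accumulating `concrete`
def pvLoopA (sys : List (String × List (String × List (List (String × Option String))))) (visited' : List String) (impls : List (List (String × Option String))) (concrete : List (List (String × Option String))) : List (List (String × Option String)) :=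
  match impls with
  | [] => concrete
  | impl :: rest =>
    match (List.lookup "base_name" impl).getD none with
    | none => pvLoopA sys visited' rest concrete               -- if not base_name: continue
    | some b =>
      if b = "" then pvLoopA sys visited' rest concrete        -- if not base_name: continue
      else if (List.lookup b sys).isSome then                  -- base_name in abstract_syscalls
        pvLoopA sys visited' rest (concrete ++ resolve_abstract_to_concrete_core sys b visited')
      else
        pvLoopA sys visited' rest (concrete ++
          [[("base_name", some b), ("condition", (List.lookup "condition" impl).getD none),
            ("call", (List.lookup "call" impl).getD none)]])
  termination_by (pvCnt sys visited', 1, impls.length)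
  decreasing_by
    all_goals first
      | exact Prod.Lex.right _ (Prod.Lex.left _ _ (by omega))
      | exact Prod.Lex.right _ (Prod.Lex.right _ (by simp only [List.length_cons]; omega))
end

def resolve_abstract_to_concrete (abstract_name : String) (abstract_syscalls : List (String × List (String × List (List (String × Option String))))) (visited : Option (List String)) : List (List (String × Option String)) :=
  -- if visited is None: visited = set()
  resolve_abstract_to_concrete_core abstract_syscalls abstract_name (visited.getD [])

-- ===== PORT B =====
-- work items of Source B's explicit stack: ("leaf", entry) and ("node", name, vis)
inductive PvItem where
  | leaf : List (String × Option String) → PvItem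
  | node : String → List String → PvItem

-- the body of Source B's inner `for impl in reversed(...)` loop: the item pushed for one impl (none = continue)
def pvToItem (sys : List (String × List (String × List (List (String × Option String))))) (vis' : List String) (impl : List (String × Option String)) : Option PvItem :=
  match (List.lookup "base_name" impl).getD none with
  | none => none
  | some b =>
    if b = "" then none
    else if (List.lookup b sys).isSome then some (PvItem.node b vis')
    else some (PvItem.leaf
      [("base_name", some b), ("condition", (List.lookup "condition" impl).getD none),
       ("call", (List.lookup "call" impl).getD none)])

-- termination measure for Source B's while-stack loop
def pvS (sys : List (String × List (String × List (List (String × Option String))))) : Nat :=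
  (sys.map (fun p => ((List.lookup "implementations" p.2).getD []).length)).sum

def pvWeight (sys : List (String × List (String × List (List (String × Option String))))) : PvItem → Nat
  | PvItem.leaf _ => 1
  | PvItem.node _ V => (pvS sys + 2) ^ (1 + pvCnt sys V)

def pvMeasure (sys : List (String × List (String × List (List (String × Option String))))) (stack : List PvItem) : Nat :=
  (stack.map (pvWeight sys)).sum

-- cited by pvRun: pushing in reverse onto the stack prepends the filtered children in order
theorem pvPush_eq (sys : List (String × List (String × List (List (String × Option String))))) (vis' : List String) (impls : List (List (String × Option String))) (rest : List PvItem) :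
    impls.reverse.foldl (fun s impl => match pvToItem sys vis' impl with | none => s | some it => it :: s) rest
      = impls.filterMap (pvToItem sys vis') ++ rest := by
  induction impls generalizing rest with
  | nil => simp
  | cons x t ih =>
    simp only [List.reverse_cons, List.foldl_append, List.foldl_cons, List.foldl_nil, ih,
      List.filterMap_cons]
    cases pvToItem sys vis' x <;> simp

theorem pv_impls_len_le (sys : List (String × List (String × List (List (String × Option String))))) (name : String) (g : List (String × List (List (String × Option String))))
    (hlk : List.lookup name sys = some g) :
    ((List.lookup "implementations" g).getD []).length ≤ pvS sys := by
  induction sys with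
  | nil => simp [List.lookup] at hlk
  | cons a rest ih =>
    obtain ⟨k, v⟩ := a
    by_cases hk : name = k
    · subst hk
      have hbeq : (name == name) = true := by simp
      simp only [List.lookup, hbeq] at hlk
      cases hlk
      simp only [pvS, List.map_cons, List.sum_cons]
      omega
    · have hbeq : (name == k) = false := by simp [hk]
      have hlk' : List.lookup name rest = some g := by
        simpa [List.lookup, hbeq] using hlk
      have := ih hlk'
      simp only [pvS, List.map_cons, List.sum_cons] at this ⊢
      omega

-- cited by pvRun's decreasing_by: the pushed children weigh strictly less than the popped node
theorem pvChildren_lt (sys : List (String × List (String × List (List (String × Option String))))) (name : String) (V : List String)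
    (h1 : ¬ (PySem.Set.contains V name = true)) :
    pvMeasure sys
      (((List.lookup "implementations" ((List.lookup name sys).getD [])).getD []).filterMap
        (pvToItem sys (PySem.Set.union V [name]))) < pvWeight sys (PvItem.node name V) := by
  have hposw : 0 < pvWeight sys (PvItem.node name V) := by
    simp only [pvWeight]; positivity
  cases hlk : List.lookup name sys with
  | none =>
    simpa [hlk, pvMeasure, List.lookup] using hposw
  | some g =>
    have hadd : PySem.Set.union V [name] = PySem.Set.add V name := by
      simp [PySem.Set.union, PySem.Set.update]
    rw [hadd]
    simp only [Option.getD_some]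
    have hcnt : pvCnt sys (PySem.Set.add V name) < pvCnt sys V :=
      pvCnt_add_lt sys V name h1 (by simp [hlk])
    set V' := PySem.Set.add V name with hV'
    have hwb : ∀ it ∈ ((List.lookup "implementations" g).getD []).filterMap (pvToItem sys V'),
        pvWeight sys it ≤ (pvS sys + 2) ^ (1 + pvCnt sys V') := by
      intro it hit
      rcases List.mem_filterMap.1 hit with ⟨impl, _, hsome⟩
      unfold pvToItem at hsome
      rcases hgb : (List.lookup "base_name" impl).getD none with _ | b
      · rw [hgb] at hsome; simp at hsome
      · rw [hgb] at hsome
        by_cases hb0 : b = ""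
        · simp [hb0] at hsome
        · by_cases hbs : (List.lookup b sys).isSome = true
          · simp only [hb0, if_false, hbs, if_true, Option.some_inj] at hsome
            cases hsome; simp [pvWeight]
          · simp only [hb0, if_false, hbs, if_false] at hsome
            cases hsome
            exact Nat.one_le_pow _ _ (by omega)
    calc pvMeasure sys (((List.lookup "implementations" g).getD []).filterMap (pvToItem sys V'))
        ≤ (((List.lookup "implementations" g).getD []).filterMap (pvToItem sys V')).length *
            ((pvS sys + 2) ^ (1 + pvCnt sys V')) := by
          simpa [pvMeasure, smul_eq_mul] using
            List.sum_le_card_nsmul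
              ((((List.lookup "implementations" g).getD []).filterMap (pvToItem sys V')).map (pvWeight sys))
              ((pvS sys + 2) ^ (1 + pvCnt sys V'))
              (by intro x hx; rcases List.mem_map.1 hx with ⟨it, hit, rfl⟩; exact hwb it hit)
      _ ≤ pvS sys * ((pvS sys + 2) ^ (1 + pvCnt sys V')) := by
          refine Nat.mul_le_mul_right _ (le_trans (List.length_filterMap_le _ _) ?_)
          exact pv_impls_len_le sys name g hlk
      _ < (pvS sys + 2) * ((pvS sys + 2) ^ (1 + pvCnt sys V')) := by
          have hpos : 0 < (pvS sys + 2) ^ (1 + pvCnt sys V') := by positivity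
          exact (Nat.mul_lt_mul_right hpos).2 (by omega)
      _ = (pvS sys + 2) ^ (1 + (1 + pvCnt sys V')) := by ring
      _ ≤ (pvS sys + 2) ^ (1 + pvCnt sys V) := Nat.pow_le_pow_right (by omega) (by omega)
      _ = pvWeight sys (PvItem.node name V) := by simp [pvWeight]

-- Source B's `while stack:` loop: pop; emit a leaf; expand a node, pushing its children in reverse
def pvRun (sys : List (String × List (String × List (List (String × Option String))))) (stack : List PvItem) (result : List (List (String × Option String))) : List (List (String × Option String)) :=
  match stack with
  | [] => result
  | PvItem.leaf d :: rest => pvRun sys rest (result ++ [d])        -- result.append(item[1])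
  | PvItem.node name vis :: rest =>
    if hskip : PySem.Set.contains vis name then pvRun sys rest result  -- if name in vis: continue
    else
      -- new_vis = vis | {name};  group = abstract_syscalls[name]  (nodes are only pushed for
      -- names present in the dict, so the lookup always succeeds);
      -- for impl in reversed(group.get("implementations", [])): push the item for impl, if any
      pvRun sys
        (((List.lookup "implementations" ((List.lookup name sys).getD [])).getD []).reverse.foldl
          (fun s impl => match pvToItem sys (PySem.Set.union vis [name]) impl with | none => s | some it => it :: s) rest)
        result
termination_by pvMeasure sys stack
decreasing_by
  · simp [pvMeasure, pvWeight]
  · simp only [pvMeasure, List.map_cons, List.sum_cons]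
    have hposw : 0 < pvWeight sys (PvItem.node name vis) := by simp only [pvWeight]; positivity
    omega
  · rw [pvPush_eq]
    simp only [pvMeasure, List.map_append, List.sum_append, List.map_cons, List.sum_cons]
    have := pvChildren_lt sys name vis hskip
    simp only [pvMeasure] at this
    omega

def resolve_abstract_to_concrete_alt (abstract_name : String) (abstract_syscalls : List (String × List (String × List (List (String × Option String))))) (visited : Option (List String)) : List (List (String × Option String)) :=
  let visited0 := visited.getD []                                    -- if visited is None: visited = set()
  if PySem.Set.contains visited0 abstract_name then []
  else if !(List.lookup abstract_name abstract_syscalls).isSome then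
    [[("base_name", some abstract_name), ("condition", none)]]
  else
    pvRun abstract_syscalls [PvItem.node abstract_name visited0] []

-- ===== PRECONDITION & SPEC =====
def Spec_resolve_abstract_to_concrete (abstract_name : String) (abstract_syscalls : List (String × List (String × List (List (String × Option String))))) (visited : Option (List String)) (out : List (List (String × Option String))) : Prop := out = resolve_abstract_to_concrete_alt abstract_name abstract_syscalls visited
instance (abstract_name : String) (abstract_syscalls : List (String × List (String × List (List (String × Option String))))) (visited : Option (List String)) (out : List (List (String × Option String))) : Decidable (Spec_resolve_abstract_to_concrete abstract_name abstract_syscalls visited out) := by unfold Spec_resolve_abstract_to_concrete; infer_instance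

-- ===== CLAIM (what is proved, stated in full; the proofs are below) =====
def Claim_equal_resolve_abstract_to_concrete : Prop := ∀ (abstract_name : String) (abstract_syscalls : List (String × List (String × List (List (String × Option String))))) (visited : Option (List String)), Dom_resolve_abstract_to_concrete abstract_name abstract_syscalls visited → Spec_resolve_abstract_to_concrete abstract_name abstract_syscalls visited (resolve_abstract_to_concrete abstract_name abstract_syscalls visited)

-- ===== LEMMAS AND PROOFS =====

-- what one work item contributes to the output: a leaf emits its entry, a node emits A's expansion
-- (a node whose name is not a key of the dict is never pushed; its emission is [] by convention)
def pvEmit (sys : List (String × List (String × List (List (String × Option String))))) : PvItem → List (List (String × Option String))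
  | PvItem.leaf d => [d]
  | PvItem.node n V =>
    if (List.lookup n sys).isSome then resolve_abstract_to_concrete_core sys n V else []

theorem pvLoopA_eq (sys : List (String × List (String × List (List (String × Option String))))) (vis' : List String) (impls : List (List (String × Option String))) (acc : List (List (String × Option String))) :
    pvLoopA sys vis' impls acc = acc ++ (impls.filterMap (pvToItem sys vis')).flatMap (pvEmit sys) := by
  induction impls generalizing acc with
  | nil => simp [pvLoopA]
  | cons impl rest ih =>
    rw [pvLoopA]
    rcases hb : (List.lookup "base_name" impl).getD none with _ | b
    · simp only [hb, List.filterMap_cons, pvToItem, ih]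
    · by_cases hb0 : b = ""
      · simp only [hb, hb0, List.filterMap_cons, pvToItem, if_true, ih]
      · by_cases hbs : (List.lookup b sys).isSome = true
        · simp only [hb, List.filterMap_cons, pvToItem, hb0, if_false, hbs, if_true, ih]
          simp [pvEmit, hbs]
        · simp only [hb, List.filterMap_cons, pvToItem, hb0, if_false, hbs, ih]
          simp [pvEmit]

theorem pvRun_eq (sys : List (String × List (String × List (List (String × Option String))))) (stack : List PvItem) (acc : List (List (String × Option String))) :
    pvRun sys stack acc = acc ++ stack.flatMap (pvEmit sys) := by
  induction stack, acc using pvRun.induct sys with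
  | case1 res => simp [pvRun]
  | case2 res d rest ih =>
    rw [pvRun, ih]
    simp [pvEmit]
  | case3 res name vis rest hc ih =>
    rw [pvRun, dif_pos hc, ih]
    have hz : pvEmit sys (PvItem.node name vis) = [] := by
      simp only [pvEmit]
      split
      · rw [resolve_abstract_to_concrete_core, dif_pos hc]
      · rfl
    simp [hz]
  | case4 res name vis rest hc ih =>
    rw [pvRun, dif_neg hc, ih, pvPush_eq, List.flatMap_append]
    have hadd : PySem.Set.union vis [name] = PySem.Set.add vis name := by
      simp [PySem.Set.union, PySem.Set.update]
    cases hg : List.lookup name sys with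
    | none =>
      have hz : pvEmit sys (PvItem.node name vis) = [] := by
        simp only [pvEmit]
        rw [hg]
        rfl
      simp [hz]
    | some g =>
      have hnode : pvEmit sys (PvItem.node name vis)
          = (((List.lookup "implementations" ((List.lookup name sys).getD [])).getD []).filterMap
              (pvToItem sys (PySem.Set.union vis [name]))).flatMap (pvEmit sys) := by
        simp only [pvEmit, hg, Option.getD_some]
        rw [if_pos (by simp), resolve_abstract_to_concrete_core, dif_neg hc]
        have hA : (match h2 : List.lookup name sys with
            | none => [[("base_name", some name), ("condition", none)]]
            | some group =>
              pvLoopA sys (PySem.Set.add vis name) ((List.lookup "implementations" group).getD []) [])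
            = pvLoopA sys (PySem.Set.add vis name) ((List.lookup "implementations" g).getD []) [] := by
          split
          · next h2 => rw [hg] at h2; cases h2
          · next group h2 => rw [hg] at h2; cases h2; rfl
        rw [hA, pvLoopA_eq, hadd]
        simp
      simp [hnode, hg]

-- ===== VERDICT (by name: the statement is the Claim_ definition above) =====
theorem resolve_abstract_to_concrete_spec : Claim_equal_resolve_abstract_to_concrete := by
  intro abstract_name sys visited _
  unfold Spec_resolve_abstract_to_concrete resolve_abstract_to_concrete
  by_cases hc : PySem.Set.contains (visited.getD []) abstract_name = true
  · have hm : abstract_name ∈ visited.getD [] := (PySem.Set.contains_iff _ _).1 hc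
    rw [resolve_abstract_to_concrete_core, dif_pos hc]
    simp [resolve_abstract_to_concrete_alt, hm]
  · have hm : abstract_name ∉ visited.getD [] := fun h => hc ((PySem.Set.contains_iff _ _).2 h)
    by_cases hlk : (List.lookup abstract_name sys).isSome = true
    · have hB : resolve_abstract_to_concrete_alt abstract_name sys visited
          = pvRun sys [PvItem.node abstract_name (visited.getD [])] [] := by
        simp [resolve_abstract_to_concrete_alt, hm, hlk]
      rw [hB, pvRun_eq sys _ _]
      simp [pvEmit, hlk]
    · have hnone : List.lookup abstract_name sys = none :=
        Option.not_isSome_iff_eq_none.1 (by simpa using hlk)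
      rw [resolve_abstract_to_concrete_core, dif_neg hc]
      have hA : (match h2 : List.lookup abstract_name sys with
          | none => [[("base_name", some abstract_name), ("condition", none)]]
          | some group =>
            pvLoopA sys (PySem.Set.add (visited.getD []) abstract_name)
              ((List.lookup "implementations" group).getD []) [])
          = [[("base_name", some abstract_name), ("condition", none)]] := by
        split
        · rfl
        · next group h2 => rw [hnone] at h2; cases h2
      rw [hA]
      simp [hnone, resolve_abstract_to_concrete_alt, hm]
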